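-- pv_equiv track=rewrite | github.com/RomanGoEmpire/Games | minesweeper/minesweeper_bot_google_new.py | count_flags
-- ===== SOURCE A (Python) =====
-- flag = (242, 54, 7)
--
-- rows = 20
--
-- cols = 24
--
-- def count_flags(index, table):
--     count = 0
--     for i in range(-1, 2):
--         for j in range(-1, 2):
--             if i == 0 and j == 0:
--                 continue
--             if 0 <= index[0] + i < rows and 0 <= index[1] + j < cols:
--                 if table[index[0] + i][index[1] + j] == flag:
--                     count += 1
--     return count
-- ===== SOURCE B (Python) =====
-- flag = (242, 54, 7)
--
-- rows = 20
--
-- cols = 24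
--
-- def count_flags(index, table):
--     r, c = index[0], index[1]
--     r0, r1 = max(0, r - 1), max(0, min(rows, r + 2))
--     c0, c1 = max(0, c - 1), max(0, min(cols, c + 2))
--     block = [row[c0:c1] for row in table[r0:r1]]
--     count = sum(cell == flag for row in block for cell in row)
--     if 0 <= r < rows and 0 <= c < cols and table[r][c] == flag:
--         count -= 1
--     return count
-- ===== Notes on version B (the rewrite author's own statement) =====
-- stated objective: simpler
-- what changed: Replaces the 3x3 offset double loop with per-cell bounds tests by slicing the clamped sub-block out of the table, counting flag cells in it, and subtracting the center flag once.
import Mathlib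
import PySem

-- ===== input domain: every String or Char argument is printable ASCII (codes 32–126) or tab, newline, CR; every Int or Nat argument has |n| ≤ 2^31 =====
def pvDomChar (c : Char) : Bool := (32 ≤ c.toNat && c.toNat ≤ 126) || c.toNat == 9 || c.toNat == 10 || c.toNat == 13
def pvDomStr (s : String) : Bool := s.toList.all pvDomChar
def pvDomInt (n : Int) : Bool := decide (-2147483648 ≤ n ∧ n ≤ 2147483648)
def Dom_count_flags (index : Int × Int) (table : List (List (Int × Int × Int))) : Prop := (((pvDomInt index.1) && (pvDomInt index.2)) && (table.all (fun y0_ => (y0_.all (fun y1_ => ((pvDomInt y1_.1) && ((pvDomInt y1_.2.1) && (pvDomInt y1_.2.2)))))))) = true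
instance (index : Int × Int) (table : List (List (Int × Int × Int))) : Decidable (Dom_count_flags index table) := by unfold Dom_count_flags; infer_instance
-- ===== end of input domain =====

-- B counts flag cells by slicing the clamped 3x3 sub-block out of the table and subtracting the
-- center flag once, instead of A's offset double loop with per-cell bounds tests (objective: simpler).


-- ===== PORT A =====
def count_flags (index : Int × Int) (table : List (List (Int × Int × Int))) : Int :=
  (PySem.List.pyRange (-1) 2 1).foldl (fun count i =>
    (PySem.List.pyRange (-1) 2 1).foldl (fun count j =>
      if i = 0 ∧ j = 0 then count
      else if (0 ≤ index.1 + i ∧ index.1 + i < 20) ∧ (0 ≤ index.2 + j ∧ index.2 + j < 24) then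
        if ((PySem.List.pyGet? table (index.1 + i)).bind
              (fun row => PySem.List.pyGet? row (index.2 + j))) = some (242, 54, 7) then
          count + 1
        else count
      else count) count) 0

-- ===== PORT B =====
def count_flags_alt (index : Int × Int) (table : List (List (Int × Int × Int))) : Int :=
  let r := index.1
  let c := index.2
  let r0 := max 0 (r - 1)
  let r1 := max 0 (min 20 (r + 2))
  let c0 := max 0 (c - 1)
  let c1 := max 0 (min 24 (c + 2))
  let block := (PySem.List.slice table (some r0) (some r1)).map
    (fun row => PySem.List.slice row (some c0) (some c1))
  let count := block.foldl (fun s row =>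
    row.foldl (fun s cell => s + (if cell = (242, 54, 7) then 1 else 0)) s) 0
  if (0 ≤ r ∧ r < 20) ∧ (0 ≤ c ∧ c < 24) ∧
      ((PySem.List.pyGet? table r).bind (fun row => PySem.List.pyGet? row c)) = some (242, 54, 7) then
    count - 1
  else count

-- ===== PRECONDITION & SPEC =====
-- Pre_ requires every 3x3-neighborhood cell (center included) that lies inside the constant
-- 20x24 board bounds to exist in the table: A raises on any missing non-center cell, and Pre_
-- additionally requires the center cell (which A skips but B reads) to exist.
def Pre_count_flags (index : Int × Int) (table : List (List (Int × Int × Int))) : Prop :=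
  ∀ i ∈ ([-1, 0, 1] : List Int), ∀ j ∈ ([-1, 0, 1] : List Int),
    ((0 ≤ index.1 + i ∧ index.1 + i < 20) ∧ (0 ≤ index.2 + j ∧ index.2 + j < 24)) →
      ((index.1 + i).toNat < table.length ∧
        (index.2 + j).toNat < (table.getD (index.1 + i).toNat []).length)
instance (index : Int × Int) (table : List (List (Int × Int × Int))) : Decidable (Pre_count_flags index table) := by unfold Pre_count_flags; infer_instance

def pvWitness_count_flags : (Int × Int) × (List (List (Int × Int × Int))) :=
  ((0, 0), [[(0, 0, 0), (0, 0, 0)], [(0, 0, 0), (0, 0, 0)]])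

def Spec_count_flags (index : Int × Int) (table : List (List (Int × Int × Int))) (out : Int) : Prop := out = count_flags_alt index table
instance (index : Int × Int) (table : List (List (Int × Int × Int))) (out : Int) : Decidable (Spec_count_flags index table out) := by unfold Spec_count_flags; infer_instance

-- ===== CLAIM (what is proved, stated in full; the proofs are below) =====
def Claim_equal_count_flags : Prop := ∀ (index : Int × Int) (table : List (List (Int × Int × Int))), Dom_count_flags index table → Pre_count_flags index table → Spec_count_flags index table (count_flags index table)

-- ===== LEMMAS AND PROOFS =====

-- reference per-cell term: 1 iff (R,C) is inside the 20x24 bounds, exists in the table and holds a flag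
def tRef (table : List (List (Int × Int × Int))) (R C : Int) : Int :=
  if 0 ≤ R ∧ R < 20 then
    if R.toNat < table.length then
      if 0 ≤ C ∧ C < 24 then
        if C.toNat < (table.getD R.toNat []).length then
          (if (table.getD R.toNat []).getD C.toNat (0, 0, 0) = (242, 54, 7) then 1 else 0)
        else 0
      else 0
    else 0
  else 0

def idxSum (g : Nat → Int) (a : Nat) : Nat → Int
  | 0 => 0
  | n + 1 => g a + idxSum g (a + 1) n

lemma idxSum_eq_zero (g : Nat → Int) (a n : Nat) (h : ∀ k, a ≤ k → g k = 0) :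
    idxSum g a n = 0 := by
  induction n generalizing a with
  | zero => rfl
  | succ n ih =>
    simp [idxSum, h a le_rfl, ih (a + 1) (fun k hk => h k (by omega))]

lemma sum_map_take_drop {α : Type} (dflt : α) (f : α → Int) (l : List α) (a n : Nat) :
    (((l.drop a).take n).map f).sum
      = idxSum (fun k => if k < l.length then f (l.getD k dflt) else 0) a n := by
  induction n generalizing a with
  | zero => simp [idxSum]
  | succ n ih =>
    by_cases h : a < l.length
    · rw [List.drop_eq_getElem_cons h]
      simp only [List.take_succ_cons, List.map_cons, List.sum_cons, idxSum]
      rw [ih]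
      simp [h]
    · rw [List.drop_eq_nil_of_le (by omega)]
      rw [idxSum_eq_zero _ _ _ (fun k hk => by rw [if_neg]; omega)]
      simp

lemma window3 (g : Nat → Int) (B c : Int) :
    idxSum g (max 0 (c - 1)).toNat ((max 0 (min B (c + 2))).toNat - (max 0 (c - 1)).toNat)
      = (if 0 ≤ c - 1 ∧ c - 1 < B then g (c - 1).toNat else 0)
        + (if 0 ≤ c ∧ c < B then g c.toNat else 0)
        + (if 0 ≤ c + 1 ∧ c + 1 < B then g (c + 1).toNat else 0) := by
  by_cases h1 : 0 ≤ c - 1 ∧ c - 1 < B <;>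
    by_cases h2 : 0 ≤ c ∧ c < B <;>
      by_cases h3 : 0 ≤ c + 1 ∧ c + 1 < B
  · -- TTT : n = 3
    have hn : (max 0 (min B (c + 2))).toNat - (max 0 (c - 1)).toNat = 3 := by omega
    have e1 : (max 0 (c - 1)).toNat = (c - 1).toNat := by omega
    have e2 : (c - 1).toNat + 1 = c.toNat := by omega
    have e3 : c.toNat + 1 = (c + 1).toNat := by omega
    rw [hn]
    simp only [idxSum, e1, e2, e3]
    rw [if_pos h1, if_pos h2, if_pos h3]; ring
  · -- TTF : n = 2
    have hn : (max 0 (min B (c + 2))).toNat - (max 0 (c - 1)).toNat = 2 := by omega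
    have e1 : (max 0 (c - 1)).toNat = (c - 1).toNat := by omega
    have e2 : (c - 1).toNat + 1 = c.toNat := by omega
    rw [hn]
    simp only [idxSum, e1, e2]
    rw [if_pos h1, if_pos h2, if_neg h3]; ring
  · exact absurd h2 (by omega)
  · -- TFF : c = B, n = 1
    have hn : (max 0 (min B (c + 2))).toNat - (max 0 (c - 1)).toNat = 1 := by omega
    have e1 : (max 0 (c - 1)).toNat = (c - 1).toNat := by omega
    rw [hn]
    simp only [idxSum, e1]
    rw [if_pos h1, if_neg h2, if_neg h3]; ring
  · -- FTT : c = 0, n = 2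
    have hn : (max 0 (min B (c + 2))).toNat - (max 0 (c - 1)).toNat = 2 := by omega
    have e1 : (max 0 (c - 1)).toNat = c.toNat := by omega
    have e2 : c.toNat + 1 = (c + 1).toNat := by omega
    rw [hn]
    simp only [idxSum, e1, e2]
    rw [if_neg h1, if_pos h2, if_pos h3]; ring
  · -- FTF : c = 0, B = 1, n = 1
    have hn : (max 0 (min B (c + 2))).toNat - (max 0 (c - 1)).toNat = 1 := by omega
    have e1 : (max 0 (c - 1)).toNat = c.toNat := by omega
    rw [hn]
    simp only [idxSum, e1]
    rw [if_neg h1, if_pos h2, if_neg h3]; ring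
  · -- FFT : c = -1, n = 1
    have hn : (max 0 (min B (c + 2))).toNat - (max 0 (c - 1)).toNat = 1 := by omega
    have e1 : (max 0 (c - 1)).toNat = (c + 1).toNat := by omega
    rw [hn]
    simp only [idxSum, e1]
    rw [if_neg h1, if_neg h2, if_pos h3]; ring
  · -- FFF : n = 0
    have hn : (max 0 (min B (c + 2))).toNat - (max 0 (c - 1)).toNat = 0 := by omega
    rw [hn]
    simp only [idxSum]
    rw [if_neg h1, if_neg h2, if_neg h3]; ring

lemma distribute3 (P Q : Prop) [Decidable P] [Decidable Q] (x y z : Int) :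
    (if P then (if Q then x + y + z else 0) else 0)
      = (if P then (if Q then x else 0) else 0) + (if P then (if Q then y else 0) else 0)
        + (if P then (if Q then z else 0) else 0) := by
  split_ifs <;> ring

lemma bind_some_iff (table : List (List (Int × Int × Int))) (R C : Int) (v : Int × Int × Int)
    (hR : 0 ≤ R) (hC : 0 ≤ C) :
    (((PySem.List.pyGet? table R).bind fun row => PySem.List.pyGet? row C) = some v)
      ↔ (R.toNat < table.length ∧ C.toNat < (table.getD R.toNat []).length ∧
          (table.getD R.toNat []).getD C.toNat (0, 0, 0) = v) := by
  rw [PySem.List.pyGet?_of_nonneg _ hR]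
  by_cases h : R.toNat < table.length
  · have hrow : table.getD R.toNat [] = table[R.toNat] := List.getD_eq_getElem table [] h
    rw [List.getElem?_eq_getElem h]
    have hb2 : ((some table[R.toNat]).bind fun row => PySem.List.pyGet? row C)
        = PySem.List.pyGet? table[R.toNat] C := rfl
    rw [hb2, PySem.List.pyGet?_of_nonneg _ hC, hrow]
    by_cases h2 : C.toNat < (table[R.toNat]).length
    · rw [List.getElem?_eq_getElem h2]
      have hc : (table[R.toNat]).getD C.toNat (0, 0, 0) = table[R.toNat][C.toNat] :=
        List.getD_eq_getElem _ _ h2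
      rw [hc]
      simp [h, h2]
    · rw [List.getElem?_eq_none (by omega)]
      simp [h, h2]
  · rw [List.getElem?_eq_none (by omega)]
    simp [h]

lemma tA_eq (table : List (List (Int × Int × Int))) (R C : Int)
    (h : ((0 ≤ R ∧ R < 20) ∧ (0 ≤ C ∧ C < 24)) →
      (R.toNat < table.length ∧ C.toNat < (table.getD R.toNat []).length)) :
    (if (0 ≤ R ∧ R < 20) ∧ (0 ≤ C ∧ C < 24) then
        (if ((PySem.List.pyGet? table R).bind fun row => PySem.List.pyGet? row C)
            = some (242, 54, 7) then (1 : Int) else 0)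
      else 0) = tRef table R C := by
  by_cases hb : (0 ≤ R ∧ R < 20) ∧ (0 ≤ C ∧ C < 24)
  · obtain ⟨hl1, hl2⟩ := h hb
    rw [if_pos hb]
    unfold tRef
    rw [if_pos hb.1, if_pos hl1, if_pos hb.2, if_pos hl2]
    simp only [bind_some_iff table R C ((242, 54, 7) : Int × Int × Int) hb.1.1 hb.2.1,
      hl1, hl2, true_and]
  · rw [if_neg hb]
    unfold tRef
    split_ifs <;> first | rfl | (exfalso; tauto)

lemma center_eq (table : List (List (Int × Int × Int))) (R C : Int) (x : Int) :
    (if (0 ≤ R ∧ R < 20) ∧ (0 ≤ C ∧ C < 24) ∧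
        ((PySem.List.pyGet? table R).bind fun row => PySem.List.pyGet? row C)
          = some (242, 54, 7) then x - 1 else x)
      = x - tRef table R C := by
  by_cases hb : (0 ≤ R ∧ R < 20) ∧ (0 ≤ C ∧ C < 24)
  · by_cases he : ((PySem.List.pyGet? table R).bind fun row => PySem.List.pyGet? row C)
        = some (242, 54, 7)
    · obtain ⟨hl1, hl2, hv⟩ := (bind_some_iff table R C _ hb.1.1 hb.2.1).mp he
      rw [if_pos ⟨hb.1, hb.2, he⟩]
      unfold tRef
      rw [if_pos hb.1, if_pos hl1, if_pos hb.2, if_pos hl2, if_pos hv]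
    · rw [if_neg (by tauto)]
      unfold tRef
      rw [if_pos hb.1, if_pos hb.2]
      by_cases hl1 : R.toNat < table.length
      · by_cases hl2 : C.toNat < (table.getD R.toNat []).length
        · rw [if_pos hl1, if_pos hl2, if_neg]
          · ring
          · intro hv
            exact he ((bind_some_iff table R C _ hb.1.1 hb.2.1).mpr ⟨hl1, hl2, hv⟩)
        · rw [if_pos hl1, if_neg hl2]; ring
      · rw [if_neg hl1]; ring
  · rw [if_neg (by tauto)]
    unfold tRef
    split_ifs <;> first | tauto | ring

def sA (index : Int × Int) (table : List (List (Int × Int × Int))) (i j : Int) : Int :=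
  if i = 0 ∧ j = 0 then 0
  else if (0 ≤ index.1 + i ∧ index.1 + i < 20) ∧ (0 ≤ index.2 + j ∧ index.2 + j < 24) then
    (if ((PySem.List.pyGet? table (index.1 + i)).bind
          fun row => PySem.List.pyGet? row (index.2 + j)) = some (242, 54, 7) then 1 else 0)
  else 0

lemma body_eq (index : Int × Int) (table : List (List (Int × Int × Int))) (i j : Int)
    (count : Int) :
    (if i = 0 ∧ j = 0 then count
     else if (0 ≤ index.1 + i ∧ index.1 + i < 20) ∧ (0 ≤ index.2 + j ∧ index.2 + j < 24) then
       if ((PySem.List.pyGet? table (index.1 + i)).bind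
            fun row => PySem.List.pyGet? row (index.2 + j)) = some (242, 54, 7) then
         count + 1
       else count
     else count)
      = count + sA index table i j := by
  unfold sA
  split_ifs <;> ring

lemma sA_eq_tRef (index : Int × Int) (table : List (List (Int × Int × Int))) (i j : Int)
    (hij : ¬(i = 0 ∧ j = 0))
    (h : ((0 ≤ index.1 + i ∧ index.1 + i < 20) ∧ (0 ≤ index.2 + j ∧ index.2 + j < 24)) →
      ((index.1 + i).toNat < table.length ∧
        (index.2 + j).toNat < (table.getD (index.1 + i).toNat []).length)) :
    sA index table i j = tRef table (index.1 + i) (index.2 + j) := by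
  unfold sA
  rw [if_neg hij]
  exact tA_eq table (index.1 + i) (index.2 + j) h

lemma A_eq (index : Int × Int) (table : List (List (Int × Int × Int)))
    (hpre : Pre_count_flags index table) :
    count_flags index table
      = tRef table (index.1 + -1) (index.2 + -1) + tRef table (index.1 + -1) (index.2 + 0)
        + tRef table (index.1 + -1) (index.2 + 1) + tRef table (index.1 + 0) (index.2 + -1)
        + tRef table (index.1 + 0) (index.2 + 1) + tRef table (index.1 + 1) (index.2 + -1)
        + tRef table (index.1 + 1) (index.2 + 0) + tRef table (index.1 + 1) (index.2 + 1) := by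
  have hR3 : PySem.List.pyRange (-1) 2 1 = [-1, 0, 1] := by decide
  have hp : ∀ i ∈ ([-1, 0, 1] : List Int), ∀ j ∈ ([-1, 0, 1] : List Int),
      ((0 ≤ index.1 + i ∧ index.1 + i < 20) ∧ (0 ≤ index.2 + j ∧ index.2 + j < 24)) →
        ((index.1 + i).toNat < table.length ∧
          (index.2 + j).toNat < (table.getD (index.1 + i).toNat []).length) := hpre
  unfold count_flags
  rw [hR3]
  simp only [List.foldl_cons, List.foldl_nil, body_eq]
  rw [sA_eq_tRef index table (-1) (-1) (by decide) (hp _ (by decide) _ (by decide)),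
    sA_eq_tRef index table (-1) 0 (by decide) (hp _ (by decide) _ (by decide)),
    sA_eq_tRef index table (-1) 1 (by decide) (hp _ (by decide) _ (by decide)),
    sA_eq_tRef index table 0 (-1) (by decide) (hp _ (by decide) _ (by decide)),
    sA_eq_tRef index table 0 1 (by decide) (hp _ (by decide) _ (by decide)),
    sA_eq_tRef index table 1 (-1) (by decide) (hp _ (by decide) _ (by decide)),
    sA_eq_tRef index table 1 0 (by decide) (hp _ (by decide) _ (by decide)),
    sA_eq_tRef index table 1 1 (by decide) (hp _ (by decide) _ (by decide))]
  have h00 : sA index table 0 0 = 0 := by unfold sA; rw [if_pos ⟨rfl, rfl⟩]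
  rw [h00]
  ring

lemma tRef_fold (table : List (List (Int × Int × Int))) (R C : Int) :
    (if 0 ≤ R ∧ R < 20 then
        if R.toNat < table.length then
          (if 0 ≤ C ∧ C < 24 then
            if C.toNat < (table.getD R.toNat []).length then
              (if (table.getD R.toNat []).getD C.toNat (0, 0, 0) = (242, 54, 7) then (1 : Int) else 0)
            else 0
          else 0)
        else 0
      else 0) = tRef table R C := rfl

lemma B_eq (index : Int × Int) (table : List (List (Int × Int × Int))) :
    count_flags_alt index table
      = tRef table (index.1 - 1) (index.2 - 1) + tRef table (index.1 - 1) index.2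
        + tRef table (index.1 - 1) (index.2 + 1) + tRef table index.1 (index.2 - 1)
        + tRef table index.1 index.2 + tRef table index.1 (index.2 + 1)
        + tRef table (index.1 + 1) (index.2 - 1) + tRef table (index.1 + 1) index.2
        + tRef table (index.1 + 1) (index.2 + 1) - tRef table index.1 index.2 := by
  unfold count_flags_alt
  rw [center_eq]
  have hs1 : PySem.List.slice table (some (max 0 (index.1 - 1)))
      (some (max 0 (min 20 (index.1 + 2))))
      = (table.drop (max 0 (index.1 - 1)).toNat).take
          ((max 0 (min 20 (index.1 + 2))).toNat - (max 0 (index.1 - 1)).toNat) :=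
    PySem.List.slice_toNat _ (le_max_left _ _) (le_max_left _ _)
  have hs2 : ∀ row : List (Int × Int × Int), PySem.List.slice row (some (max 0 (index.2 - 1)))
      (some (max 0 (min 24 (index.2 + 2))))
      = (row.drop (max 0 (index.2 - 1)).toNat).take
          ((max 0 (min 24 (index.2 + 2))).toNat - (max 0 (index.2 - 1)).toNat) :=
    fun row => PySem.List.slice_toNat row (le_max_left _ _) (le_max_left _ _)
  simp only [PySem.List.foldl_add, hs1, hs2, List.map_map, Function.comp_def]
  simp only [sum_map_take_drop ((0, 0, 0) : Int × Int × Int)]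
  simp only [sum_map_take_drop ([] : List (Int × Int × Int))]
  simp only [window3, distribute3, tRef_fold]
  ring

-- ===== VERDICT (by name: the statement is the Claim_ definition above) =====
theorem count_flags_spec : Claim_equal_count_flags := by
  intro index table _ hpre
  unfold Spec_count_flags
  rw [A_eq index table hpre, B_eq index table]
  have e1 : index.1 + -1 = index.1 - 1 := by ring
  have e2 : index.2 + -1 = index.2 - 1 := by ring
  have e3 : index.1 + 0 = index.1 := by ring
  have e4 : index.2 + 0 = index.2 := by ring
  rw [e1, e2, e3, e4]
  ring
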